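-- pv_equiv track=rewrite | github.com/najikh2002/Larathon | vendor/Illuminate/Console/bundler.py | remove_all_imports
-- ===== SOURCE A (Python) =====
-- def remove_all_imports(content: str) -> str:
--     """Remove all import statements from content"""
--     lines = content.split('\n')
--     result = []
--     in_multiline_import = False
--
--     for line in lines:
--         stripped = line.strip()
--
--         # Skip import lines
--         if stripped.startswith('import ') or stripped.startswith('from '):
--             if '(' in line and ')' not in line:
--                 in_multiline_import = True
--             elif ')' in line:
--                 in_multiline_import = False
--             continue
--
--         if in_multiline_import:
--             if ')' in line:
--                 in_multiline_import = False
--             continue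
--
--         result.append(line)
--
--     return '\n'.join(result)
-- ===== SOURCE B (Python) =====
-- def remove_all_imports(content: str) -> str:
--     """Remove all import statements from content"""
--     lines = content.split('\n')
--     result = []
--     i = 0
--     n = len(lines)
--     while i < n:
--         line = lines[i]
--         stripped = line.strip()
--         if stripped.startswith('import ') or stripped.startswith('from '):
--             if '(' in line and ')' not in line:
--                 # multiline import: skip forward to the first line with a closing paren
--                 i += 1
--                 while i < n and ')' not in lines[i]:
--                     i += 1
--             i += 1
--         else:
--             result.append(line)
--             i += 1
--     return '\n'.join(result)
-- ===== Notes on version B (the rewrite author's own statement) =====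
-- stated objective: alternative
-- what changed: Replaces the cross-iteration boolean state flag with an index-based while loop that consumes a whole multiline import block with a nested inner scan to the first line that contains a closing parenthesis.
import Mathlib
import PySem

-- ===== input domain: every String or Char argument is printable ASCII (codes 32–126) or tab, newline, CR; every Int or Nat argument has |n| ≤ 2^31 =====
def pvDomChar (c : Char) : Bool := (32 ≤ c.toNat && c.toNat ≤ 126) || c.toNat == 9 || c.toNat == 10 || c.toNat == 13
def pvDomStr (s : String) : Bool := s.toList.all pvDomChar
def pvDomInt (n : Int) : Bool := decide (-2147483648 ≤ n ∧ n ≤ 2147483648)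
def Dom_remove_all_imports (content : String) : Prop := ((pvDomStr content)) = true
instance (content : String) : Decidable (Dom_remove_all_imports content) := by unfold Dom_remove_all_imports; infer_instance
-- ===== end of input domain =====

-- B replaces A's cross-iteration boolean flag with an index/while loop that consumes a
-- multiline import block via a nested inner scan (objective: alternative decomposition).

-- ===== PORT A =====
-- one step of A's for-loop: state is (result, in_multiline_import)
def pvAStep (st : List String × Bool) (line : String) : List String × Bool :=
  let stripped := PySem.Str.strip line
  if PySem.Str.startswith stripped "import " || PySem.Str.startswith stripped "from " then
    if PySem.Str.isIn "(" line && !PySem.Str.isIn ")" line then (st.1, true)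
    else if PySem.Str.isIn ")" line then (st.1, false)
    else st
  else if st.2 then
    (if PySem.Str.isIn ")" line then (st.1, false) else st)
  else (st.1 ++ [line], st.2)

def remove_all_imports (content : String) : String :=
  let lines := (PySem.Str.split? content "\n").getD []
  PySem.Str.join "\n" ((lines.foldl pvAStep ([], false)).1)

-- ===== PORT B =====
-- inner while loop of B: skip lines up to and including the first one that contains a closing parenthesis
def pvSkipBlock : List String → List String
  | [] => []
  | l :: rest => if PySem.Str.isIn ")" l then rest else pvSkipBlock rest

theorem pvSkipBlock_length_le : ∀ (ls : List String), (pvSkipBlock ls).length ≤ ls.length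
  | [] => Nat.le_refl _
  | l :: rest => by
      simp only [pvSkipBlock]
      split
      · exact Nat.le_succ _
      · exact Nat.le_trans (pvSkipBlock_length_le rest) (Nat.le_succ _)

-- outer while loop of B, as structural recursion over the remaining lines
def pvBGo : List String → List String
  | [] => []
  | l :: rest =>
    let stripped := PySem.Str.strip l
    if PySem.Str.startswith stripped "import " || PySem.Str.startswith stripped "from " then
      if PySem.Str.isIn "(" l && !PySem.Str.isIn ")" l then pvBGo (pvSkipBlock rest)
      else pvBGo rest
    else l :: pvBGo rest
termination_by ls => ls.length
decreasing_by
  · exact Nat.lt_succ_of_le (pvSkipBlock_length_le rest)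
  · exact Nat.lt_succ_of_le (Nat.le_refl _)
  · exact Nat.lt_succ_of_le (Nat.le_refl _)

def remove_all_imports_alt (content : String) : String :=
  PySem.Str.join "\n" (pvBGo ((PySem.Str.split? content "\n").getD []))

-- ===== PRECONDITION & SPEC =====
def Spec_remove_all_imports (content : String) (out : String) : Prop := out = remove_all_imports_alt content
instance (content : String) (out : String) : Decidable (Spec_remove_all_imports content out) := by unfold Spec_remove_all_imports; infer_instance

-- ===== CLAIM (what is proved, stated in full; the proofs are below) =====
def Claim_equal_remove_all_imports : Prop := ∀ (content : String), Dom_remove_all_imports content → Spec_remove_all_imports content (remove_all_imports content)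

-- ===== LEMMAS AND PROOFS =====

-- A's fold with flag=false computes pvBGo; with flag=true it computes pvBGo of pvSkipBlock.
theorem pvFold_eq : ∀ (lines : List String) (acc : List String),
    ((lines.foldl pvAStep (acc, false)).1 = acc ++ pvBGo lines) ∧
    ((lines.foldl pvAStep (acc, true)).1 = acc ++ pvBGo (pvSkipBlock lines)) := by
  intro lines
  induction lines with
  | nil => intro acc; simp [pvBGo, pvSkipBlock]
  | cons l rest ih =>
    intro acc
    constructor
    · show ((l :: rest).foldl pvAStep (acc, false)).1 = acc ++ pvBGo (l :: rest)
      simp only [List.foldl_cons, pvAStep, pvBGo]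
      split_ifs with h1 h2 h3 <;>
        simp_all [(ih acc).1, (ih acc).2, (ih (acc ++ [l])).1]
    · show ((l :: rest).foldl pvAStep (acc, true)).1 = acc ++ pvBGo (pvSkipBlock (l :: rest))
      simp only [List.foldl_cons, pvAStep, pvSkipBlock]
      split_ifs with h1 h2 h3 h4 <;>
        simp_all [(ih acc).1, (ih acc).2]

-- ===== VERDICT (by name: the statement is the Claim_ definition above) =====
theorem remove_all_imports_spec : Claim_equal_remove_all_imports := by
  intro content _
  show remove_all_imports content = remove_all_imports_alt content
  show PySem.Str.join "\n"
      ((((PySem.Str.split? content "\n").getD []).foldl pvAStep ([], false)).1) =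
    PySem.Str.join "\n" (pvBGo ((PySem.Str.split? content "\n").getD []))
  rw [(pvFold_eq ((PySem.Str.split? content "\n").getD []) []).1]
  simp
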